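-- pv_equiv track=rewrite | github.com/miliar/Code_Jam_Webscraper | solutions_python/Problem_157/490.py | find_j
-- ===== SOURCE A (Python) =====
-- def find_index(a):
--     if a == "1":
--         return 0
--     elif a == "i":
--         return 1
--     elif a == "j":
--         return 2
--     else:
--         return 3
--
-- def multi(a, b):
--     neg = False
--     if len(a) + len(b) == 3:
--         neg = True
--     a_i = find_index(a[-1])
--     b_i = find_index(b[-1])
--     values = [["1", "i", "j", "k"],
--               ["i", "-1", "k", "-j"],
--               ["j", "-k", "-1", "i"],
--               ["k", "j", "-i", "-1"]]
--     val = values[a_i][b_i]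
--     if neg:
--         if len(val) == 2:
--             return val[-1]
--         else:
--             return "-" + val
--     else:
--         return val
--
-- def find_rest(s):
--     current = s[0]
--     for i in range(1, len(s)):
--         current = multi(current, s[i])
--     return current
--
-- def find_j(s):
--     current = s[0]
--     for i in range(1, len(s)):
--         if current == "j":
--             if find_rest(s[i:]) == "k":
--                 return True
--         current = multi(current, s[i])
--     return False
-- ===== SOURCE B (Python) =====
-- # Alternative: one backward pass precomputes the suffix products as (basis-index, sign)
-- # pairs, then one forward pass checks every split against them, with no per-split
-- # find_rest rescan.
-- _IDX = {"1": 0, "i": 1, "j": 2}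
--
-- _TBL = [[(0, 1), (1, 1), (2, 1), (3, 1)],
--         [(1, 1), (0, -1), (3, 1), (2, -1)],
--         [(2, 1), (3, -1), (0, -1), (1, 1)],
--         [(3, 1), (2, 1), (1, -1), (0, -1)]]
--
--
-- def _idx(c):
--     return _IDX.get(c, 3)
--
--
-- def _mul(p, q):
--     r, sgn = _TBL[p[0]][q[0]]
--     return (r, sgn * p[1] * q[1])
--
--
-- def find_j(s):
--     n = len(s)
--     cur = (_idx(s[0]), 1)
--     if n == 1:
--         return False
--     # suffix products (as pairs) for the splits whose suffix has length >= 2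
--     suf = [None] * n
--     p = (_idx(s[n - 1]), 1)
--     for i in range(n - 2, 0, -1):
--         p = _mul((_idx(s[i]), 1), p)
--         suf[i] = p
--     for i in range(1, n - 1):
--         if cur == (2, 1) and suf[i] == (3, 1):
--             return True
--         cur = _mul(cur, (_idx(s[i]), 1))
--     # last split: the one-character suffix is compared literally against "k"
--     return cur == (2, 1) and s[n - 1] == "k"
-- ===== Notes on version B (the rewrite author's own statement) =====
-- stated objective: alternative
-- what changed: Quaternion values are represented as (basis-index, sign) pairs and all suffix products are precomputed in one backward pass, so each split is checked against a stored pair instead of recomputing the suffix product from scratch with find_rest.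
import Mathlib
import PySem

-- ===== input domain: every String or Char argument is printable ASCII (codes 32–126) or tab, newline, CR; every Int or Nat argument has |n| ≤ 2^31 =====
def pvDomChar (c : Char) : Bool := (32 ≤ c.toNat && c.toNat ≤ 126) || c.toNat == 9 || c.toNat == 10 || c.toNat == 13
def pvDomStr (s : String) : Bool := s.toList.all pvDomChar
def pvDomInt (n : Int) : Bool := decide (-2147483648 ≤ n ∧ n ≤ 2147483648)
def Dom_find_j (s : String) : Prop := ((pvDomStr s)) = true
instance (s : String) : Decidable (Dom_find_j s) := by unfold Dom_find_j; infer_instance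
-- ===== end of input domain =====

-- B replaces A's rescan of every suffix (find_rest at each split) by one backward pass of
-- precomputed suffix products on (basis-index, sign) pairs; return values agree on every
-- nonempty string (A raises IndexError on "").

-- ===== PORT A =====
def find_index (a : String) : Int :=
  if a = "1" then 0 else if a = "i" then 1 else if a = "j" then 2 else 3

-- Python's a[-1] as a one-character string (totalized with "" where Python raises)
def lastStr (a : String) : String :=
  match PySem.Str.pyGet? a (-1) with
  | some c => String.ofList [c]
  | none => ""

def multiValues : List (List String) :=
  [["1", "i", "j", "k"], ["i", "-1", "k", "-j"], ["j", "-k", "-1", "i"], ["k", "j", "-i", "-1"]]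

def multi (a b : String) : String :=
  let neg : Bool := PySem.Str.len a + PySem.Str.len b == 3
  let a_i := find_index (lastStr a)
  let b_i := find_index (lastStr b)
  let val := (PySem.List.pyGet? ((PySem.List.pyGet? multiValues a_i).getD []) b_i).getD ""
  if neg then
    (if PySem.Str.len val == 2 then lastStr val else String.ofList ('-' :: val.toList))
  else val

def find_rest_go (current : String) : List Char → String
  | [] => current
  | c :: cs => find_rest_go (multi current (String.ofList [c])) cs

def find_rest (s : String) : String :=
  match s.toList with
  | [] => ""            -- unreachable: A only calls find_rest on nonempty slices
  | c :: cs => find_rest_go (String.ofList [c]) cs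

def find_j_go (current : String) : List Char → Bool
  | [] => false
  | c :: cs =>
    if current = "j" ∧ find_rest (String.ofList (c :: cs)) = "k" then true
    else find_j_go (multi current (String.ofList [c])) cs

def find_j (s : String) : Bool :=
  match s.toList with
  | [] => false         -- Python raises IndexError on ""; excluded by Pre_
  | c :: cs => find_j_go (String.ofList [c]) cs

-- ===== PORT B =====
def idxC (c : Char) : Int :=
  PySem.Dict.getD (PySem.Dict.ofList [('1', (0 : Int)), ('i', 1), ('j', 2)]) c 3

def mulTbl : List (List (Int × Int)) :=
  [[(0, 1), (1, 1), (2, 1), (3, 1)],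
   [(1, 1), (0, -1), (3, 1), (2, -1)],
   [(2, 1), (3, -1), (0, -1), (1, 1)],
   [(3, 1), (2, 1), (1, -1), (0, -1)]]

def mulP (p q : Int × Int) : Int × Int :=
  let rs := (PySem.List.pyGet? ((PySem.List.pyGet? mulTbl p.1).getD []) q.1).getD (0, 1)
  (rs.1, rs.2 * p.2 * q.2)

-- the backward pass: (product of the whole list, pairs for all suffixes of length ≥ 2)
def sufAux : List Char → (Int × Int) × List (Int × Int)
  | [] => ((0, 1), [])
  | [c] => ((idxC c, 1), [])
  | c :: c' :: cs =>
    let pa := sufAux (c' :: cs)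
    let p' := mulP (idxC c, 1) pa.1
    (p', p' :: pa.2)

-- the forward pass over the middle characters and the precomputed suffix pairs;
-- the final one-character suffix is compared literally against 'k'
def goB (cur : Int × Int) (ms : List Char) (ps : List (Int × Int)) (lst : Char) : Bool :=
  match ms, ps with
  | c :: ms', p :: ps' =>
    if cur = ((2 : Int), (1 : Int)) ∧ p = ((3 : Int), (1 : Int)) then true
    else goB (mulP cur (idxC c, 1)) ms' ps' lst
  | _, _ => decide (cur = ((2 : Int), (1 : Int)) ∧ lst = 'k')

def find_j_alt (s : String) : Bool :=
  match s.toList with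
  | [] => false         -- Python raises IndexError on ""; excluded by Pre_
  | [_] => false
  | c0 :: c1 :: cs =>
    goB (idxC c0, 1) ((c1 :: cs).dropLast) (sufAux (c1 :: cs)).2 ((c1 :: cs).getLastD ' ')

-- ===== PRECONDITION & SPEC =====
-- Pre_ excludes only the empty string, on which A raises IndexError (s[0]).
def Pre_find_j (s : String) : Prop := s ≠ ""
instance (s : String) : Decidable (Pre_find_j s) := by unfold Pre_find_j; infer_instance
def pvWitness_find_j : String := "jk"

def Spec_find_j (s : String) (out : Bool) : Prop := out = find_j_alt s
instance (s : String) (out : Bool) : Decidable (Spec_find_j s out) := by unfold Spec_find_j; infer_instance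

-- ===== CLAIM (what is proved, stated in full; the proofs are below) =====
def Claim_equal_find_j : Prop := ∀ (s : String), Dom_find_j s → Pre_find_j s → Spec_find_j s (find_j s)

-- ===== LEMMAS AND PROOFS =====

-- A's current strings abstracted to B's (index, sign) pairs: the 8 normalized values …
def RelT (a : String) (p : Int × Int) : Prop :=
  (a = "1" ∧ p = (0, 1)) ∨ (a = "i" ∧ p = (1, 1)) ∨ (a = "j" ∧ p = (2, 1)) ∨ (a = "k" ∧ p = (3, 1)) ∨
  (a = "-1" ∧ p = (0, -1)) ∨ (a = "-i" ∧ p = (1, -1)) ∨ (a = "-j" ∧ p = (2, -1)) ∨ (a = "-k" ∧ p = (3, -1))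

-- … or a raw single character (the state before the first multiplication)
def RelQ (a : String) (p : Int × Int) : Prop :=
  (∃ c, a = String.ofList [c] ∧ p = (idxC c, 1)) ∨ RelT a p

lemma idxC_else (c : Char) (h1 : ¬ c = '1') (hi : ¬ c = 'i') (hj : ¬ c = 'j') : idxC c = 3 := by
  have e : PySem.Dict.ofList [('1', (0:Int)), ('i', 1), ('j', 2)]
      = PySem.Dict.mk [('1', (0:Int)), ('i', 1), ('j', 2)] := by decide
  simp [idxC, e, PySem.Dict.getD, beq_iff_eq, Ne.symm h1, Ne.symm hi, Ne.symm hj, PySem.Dict.get?]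

lemma idxC_cases (c : Char) : idxC c = 0 ∨ idxC c = 1 ∨ idxC c = 2 ∨ idxC c = 3 := by
  by_cases h1 : c = '1'
  · subst h1; left; decide
  by_cases hi : c = 'i'
  · subst hi; right; left; decide
  by_cases hj : c = 'j'
  · subst hj; right; right; left; decide
  · exact Or.inr (Or.inr (Or.inr (idxC_else c h1 hi hj)))

lemma find_index_single (c : Char) : find_index (String.ofList [c]) = idxC c := by
  by_cases h1 : c = '1'
  · subst h1; decide
  by_cases hi : c = 'i'
  · subst hi; decide
  by_cases hj : c = 'j'
  · subst hj; decide
  · rw [idxC_else c h1 hi hj, find_index,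
      if_neg (by simp [String.ext_iff]; exact h1),
      if_neg (by simp [String.ext_iff]; exact hi),
      if_neg (by simp [String.ext_iff]; exact hj)]

lemma lastStr_single (c : Char) : lastStr (String.ofList [c]) = String.ofList [c] := by
  simp [lastStr, pysem]

lemma len_single (c : Char) : PySem.Str.len (String.ofList [c]) = 1 := by
  simp [pysem]

-- multi with a one-character right argument, its dependence on that character through idxC only
def multiCore (la ai bi : Int) : String :=
  let neg : Bool := la + 1 == 3
  let val := (PySem.List.pyGet? ((PySem.List.pyGet? multiValues ai).getD []) bi).getD ""
  if neg then
    (if PySem.Str.len val == 2 then lastStr val else String.ofList ('-' :: val.toList))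
  else val

lemma multi_eq_core (a : String) (c : Char) :
    multi a (String.ofList [c]) = multiCore (PySem.Str.len a) (find_index (lastStr a)) (idxC c) := by
  rw [multi, multiCore, lastStr_single, find_index_single, len_single]

lemma hom_raw (c' c : Char) :
    RelT (multi (String.ofList [c']) (String.ofList [c])) (mulP (idxC c', 1) (idxC c, 1)) := by
  rw [multi_eq_core, lastStr_single, find_index_single, len_single]
  rcases idxC_cases c' with h' | h' | h' | h' <;> rcases idxC_cases c with h | h | h | h <;>
    rw [h, h'] <;> unfold RelT <;> decide

lemma homT (a : String) (p : Int × Int) (c : Char) (h : RelT a p) :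
    RelT (multi a (String.ofList [c])) (mulP p (idxC c, 1)) := by
  rcases h with ⟨rfl, rfl⟩ | ⟨rfl, rfl⟩ | ⟨rfl, rfl⟩ | ⟨rfl, rfl⟩ | ⟨rfl, rfl⟩ | ⟨rfl, rfl⟩ | ⟨rfl, rfl⟩ | ⟨rfl, rfl⟩ <;>
    rw [multi_eq_core] <;> rcases idxC_cases c with h | h | h | h <;> rw [h] <;> unfold RelT <;> decide

lemma homQ (a : String) (p : Int × Int) (c : Char) (h : RelQ a p) :
    RelQ (multi a (String.ofList [c])) (mulP p (idxC c, 1)) := by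
  rcases h with ⟨c', rfl, rfl⟩ | h
  · exact Or.inr (hom_raw c' c)
  · exact Or.inr (homT a p c h)

def Vp (p : Int × Int) : Prop :=
  (p.1 = 0 ∨ p.1 = 1 ∨ p.1 = 2 ∨ p.1 = 3) ∧ (p.2 = 1 ∨ p.2 = -1)

lemma Vp_idx (c : Char) : Vp (idxC c, 1) := by
  rcases idxC_cases c with h | h | h | h <;> exact ⟨by simp [h], by simp⟩

lemma Vp_mul (p q : Int × Int) (hp : Vp p) (hq : Vp q) : Vp (mulP p q) := by
  obtain ⟨a, b⟩ := p; obtain ⟨x, y⟩ := q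
  obtain ⟨h1 | h1 | h1 | h1, h2 | h2⟩ := hp <;> obtain ⟨h3 | h3 | h3 | h3, h4 | h4⟩ := hq <;>
    simp_all <;> subst_vars <;> unfold Vp <;> decide

lemma mulP_assoc (p q r : Int × Int) (hp : Vp p) (hq : Vp q) (hr : Vp r) :
    mulP (mulP p q) r = mulP p (mulP q r) := by
  obtain ⟨a, b⟩ := p; obtain ⟨x, y⟩ := q; obtain ⟨u, v⟩ := r
  obtain ⟨h1 | h1 | h1 | h1, h2 | h2⟩ := hp <;> obtain ⟨h3 | h3 | h3 | h3, h4 | h4⟩ := hq <;>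
    obtain ⟨h5 | h5 | h5 | h5, h6 | h6⟩ := hr <;> simp_all <;> subst_vars <;> decide

-- the right-to-left suffix product B computes
def pairProd : List Char → Int × Int
  | [] => (0, 1)
  | [c] => (idxC c, 1)
  | c :: c' :: cs => mulP (idxC c, 1) (pairProd (c' :: cs))

lemma Vp_pairProd (c : Char) (cs : List Char) : Vp (pairProd (c :: cs)) := by
  induction cs generalizing c with
  | nil => exact Vp_idx c
  | cons c' cs ih => exact Vp_mul _ _ (Vp_idx c) (ih c')

lemma sufAux_fst : ∀ l, (sufAux l).1 = pairProd l
  | [] => rfl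
  | [c] => rfl
  | c :: c' :: cs => by simp [sufAux, pairProd, sufAux_fst (c' :: cs)]

lemma sufAux_snd (c c' : Char) (cs : List Char) :
    (sufAux (c :: c' :: cs)).2 = pairProd (c :: c' :: cs) :: (sufAux (c' :: cs)).2 := by
  simp [sufAux, pairProd, sufAux_fst (c' :: cs)]

lemma rest_goT (cs : List Char) : ∀ (a : String) (p : Int × Int), RelT a p →
    RelT (find_rest_go a cs) (List.foldl (fun q c => mulP q (idxC c, 1)) p cs) := by
  induction cs with
  | nil => intro a p h; exact h
  | cons c cs ih => intro a p h; exact ih _ _ (homT a p c h)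

lemma foldl_mulP (cs : List Char) : ∀ (c : Char) (p : Int × Int), Vp p →
    List.foldl (fun q c => mulP q (idxC c, 1)) p (c :: cs) = mulP p (pairProd (c :: cs)) := by
  induction cs with
  | nil => intro c p _; rfl
  | cons c' cs ih =>
    intro c p hp
    have h1 : List.foldl (fun q c => mulP q (idxC c, 1)) p (c :: c' :: cs)
        = List.foldl (fun q c => mulP q (idxC c, 1)) (mulP p (idxC c, 1)) (c' :: cs) := rfl
    rw [h1, ih c' _ (Vp_mul _ _ hp (Vp_idx c)),
        mulP_assoc _ _ _ hp (Vp_idx c) (Vp_pairProd c' cs)]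
    rfl

lemma restT (c c' : Char) (cs : List Char) :
    RelT (find_rest (String.ofList (c :: c' :: cs))) (pairProd (c :: c' :: cs)) := by
  have h1 : find_rest (String.ofList (c :: c' :: cs))
      = find_rest_go (multi (String.ofList [c]) (String.ofList [c'])) cs := by
    simp only [find_rest, String.toList_ofList, find_rest_go]
  have h2 := rest_goT cs _ _ (hom_raw c c')
  rw [h1]
  have h3 : List.foldl (fun q c => mulP q (idxC c, 1)) (mulP (idxC c, 1) (idxC c', 1)) cs
      = pairProd (c :: c' :: cs) := by
    cases cs with
    | nil => rfl
    | cons c'' cs' =>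
      rw [foldl_mulP cs' c'' _ (Vp_mul _ _ (Vp_idx c) (Vp_idx c')),
          mulP_assoc _ _ _ (Vp_idx c) (Vp_idx c') (Vp_pairProd c'' cs')]
      rfl
  rwa [h3] at h2

lemma idxC_eq_two (c : Char) : idxC c = 2 ↔ c = 'j' := by
  constructor
  · intro h
    by_cases h1 : c = '1'
    · subst h1; exact absurd h (by decide)
    by_cases hi : c = 'i'
    · subst hi; exact absurd h (by decide)
    by_cases hj : c = 'j'
    · exact hj
    · rw [idxC_else c h1 hi hj] at h; simp at h
  · intro h; subst h; decide

lemma j_test (a : String) (p : Int × Int) (h : RelQ a p) : a = "j" ↔ p = ((2 : Int), (1 : Int)) := by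
  rcases h with ⟨c, rfl, rfl⟩ | h
  · have e : (String.ofList [c] = "j") ↔ c = 'j' := by simp [String.ext_iff]
    rw [e, Prod.ext_iff]
    simp [idxC_eq_two]
  · rcases h with ⟨rfl, rfl⟩ | ⟨rfl, rfl⟩ | ⟨rfl, rfl⟩ | ⟨rfl, rfl⟩ | ⟨rfl, rfl⟩ | ⟨rfl, rfl⟩ | ⟨rfl, rfl⟩ | ⟨rfl, rfl⟩ <;> simp

lemma k_testT (a : String) (p : Int × Int) (h : RelT a p) : a = "k" ↔ p = ((3 : Int), (1 : Int)) := by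
  rcases h with ⟨rfl, rfl⟩ | ⟨rfl, rfl⟩ | ⟨rfl, rfl⟩ | ⟨rfl, rfl⟩ | ⟨rfl, rfl⟩ | ⟨rfl, rfl⟩ | ⟨rfl, rfl⟩ | ⟨rfl, rfl⟩ <;> simp

lemma main_lemma (cs : List Char) : ∀ (a : String) (p : Int × Int), cs ≠ [] → RelQ a p →
    find_j_go a cs = goB p cs.dropLast (sufAux cs).2 (cs.getLastD ' ') := by
  induction cs with
  | nil => intro a p h _; exact absurd rfl h
  | cons c cs ih =>
    intro a p _ hrel
    cases cs with
    | nil =>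
      have hj' := j_test a p hrel
      have hrest : find_rest (String.ofList [c]) = String.ofList [c] := by
        simp only [find_rest, String.toList_ofList, find_rest_go]
      have hk : (find_rest (String.ofList [c]) = "k") ↔ c = 'k' := by
        rw [hrest]; simp [String.ext_iff]
      show (if a = "j" ∧ find_rest (String.ofList [c]) = "k" then true
            else find_j_go (multi a (String.ofList [c])) []) = goB p [] [] c
      by_cases hc : p = ((2 : Int), (1 : Int)) ∧ c = 'k'
      · rw [if_pos ⟨hj'.mpr hc.1, hk.mpr hc.2⟩]
        simp [goB, hc]
      · rw [if_neg (fun h => hc ⟨hj'.mp h.1, hk.mp h.2⟩)]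
        simp [goB, find_j_go, hc]
    | cons c' cs' =>
      have hj' := j_test a p hrel
      have hk := k_testT _ _ (restT c c' cs')
      have hgB : goB p ((c :: c' :: cs').dropLast) (sufAux (c :: c' :: cs')).2
            ((c :: c' :: cs').getLastD ' ')
          = if p = ((2 : Int), (1 : Int)) ∧ pairProd (c :: c' :: cs') = ((3 : Int), (1 : Int))
            then true
            else goB (mulP p (idxC c, 1)) ((c' :: cs').dropLast) (sufAux (c' :: cs')).2
              ((c' :: cs').getLastD ' ') := by
        rw [sufAux_snd]
        rfl
      show (if a = "j" ∧ find_rest (String.ofList (c :: c' :: cs')) = "k" then true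
            else find_j_go (multi a (String.ofList [c])) (c' :: cs'))
          = goB p ((c :: c' :: cs').dropLast) (sufAux (c :: c' :: cs')).2 ((c :: c' :: cs').getLastD ' ')
      rw [hgB]
      by_cases hc : p = ((2 : Int), (1 : Int)) ∧ pairProd (c :: c' :: cs') = ((3 : Int), (1 : Int))
      · rw [if_pos ⟨hj'.mpr hc.1, hk.mpr hc.2⟩, if_pos hc]
      · rw [if_neg (fun h => hc ⟨hj'.mp h.1, hk.mp h.2⟩), if_neg hc]
        exact ih _ _ (by simp) (homQ a p c hrel)

-- ===== VERDICT (by name: the statement is the Claim_ definition above) =====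
theorem find_j_spec : Claim_equal_find_j := by
  intro s _ hpre
  unfold Spec_find_j
  cases hl : s.toList with
  | nil =>
    exact absurd (String.toList_eq_nil_iff.mp hl) hpre
  | cons c cs =>
    cases cs with
    | nil =>
      have hA : find_j s = find_j_go (String.ofList [c]) [] := by
        simp only [find_j.eq_def, hl]
      have hB : find_j_alt s = false := by
        simp only [find_j_alt.eq_def, hl]
      rw [hA, hB, find_j_go]
    | cons c' cs' =>
      have hA : find_j s = find_j_go (String.ofList [c]) (c' :: cs') := by
        simp only [find_j.eq_def, hl]
      have hB : find_j_alt s = goB (idxC c, 1) ((c' :: cs').dropLast) (sufAux (c' :: cs')).2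
          ((c' :: cs').getLastD ' ') := by
        simp only [find_j_alt.eq_def, hl]
      rw [hA, hB]
      exact main_lemma (c' :: cs') _ _ (by simp) (Or.inl ⟨c, rfl, rfl⟩)
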